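-- pv_equiv track=rewrite | github.com/DCSR6667/need_to_do | recursion_problems/subset_problems/generalized_abbreviation.py | ga
-- ===== SOURCE A (Python) =====
-- def ga(res,s):
--     if len(s)==0:
--         return [res]
--
--     final1=ga(res+s[0],s[1:])
--
--     if res=="":
--         res=res+"1"
--     else:
--         ch=res[-1]
--         if ord(ch)>=65 and ord(ch)<=90 or ord(ch)>=97 and ord(ch)<=122:
--             res=res+"1"
--         else:
--             val=int(ch)+1
--             size=len(res)-1
--             res=res[0:size]+str(val)
--
--     final2=ga(res,s[1:])
--
--     return final1+final2
-- ===== SOURCE B (Python) =====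
-- def ga(res, s):
--     # Iterative breadth-first expansion: keep one level of partial results and
--     # expand each by [keep-char, abbreviate] per character; level order equals
--     # A's keep-first DFS order.
--     def succ(cur, ch):
--         keep = cur + ch
--         if cur == "":
--             abbr = "1"
--         else:
--             last = cur[-1]
--             if 65 <= ord(last) <= 90 or 97 <= ord(last) <= 122:
--                 abbr = cur + "1"
--             else:
--                 abbr = cur[:-1] + str(int(last) + 1)
--         return [keep, abbr]
--     level = [res]
--     for ch in s:
--         level = [nxt for cur in level for nxt in succ(cur, ch)]
--     return level
-- ===== Notes on version B (the rewrite author's own statement) =====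
-- stated objective: alternative
-- what changed: Replaced A's depth-first recursion (which concatenates the results of two recursive calls per character) by an iterative breadth-first expansion that keeps one level of partial results and expands each by [keep, abbreviate] per character; the level order coincides with A's DFS order.
import Mathlib
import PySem

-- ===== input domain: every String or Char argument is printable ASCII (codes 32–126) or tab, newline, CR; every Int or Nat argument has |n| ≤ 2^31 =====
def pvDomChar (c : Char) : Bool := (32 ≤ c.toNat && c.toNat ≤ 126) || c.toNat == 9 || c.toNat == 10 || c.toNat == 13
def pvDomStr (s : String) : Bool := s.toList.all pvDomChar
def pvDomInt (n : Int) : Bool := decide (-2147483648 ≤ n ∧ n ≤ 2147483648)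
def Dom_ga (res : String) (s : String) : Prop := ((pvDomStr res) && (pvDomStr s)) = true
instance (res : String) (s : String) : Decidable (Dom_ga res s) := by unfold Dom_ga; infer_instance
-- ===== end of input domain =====

-- B replaces A's depth-first recursion by an iterative breadth-first level expansion
-- (same cost, different decomposition); faithfully keeps A's single-last-digit increment rule.


-- ===== PORT A =====
-- literal port of A over List Char; res.getLastD is res[-1] (the branch only runs with res ≠ []);
-- Python's int(ch) is PySem.Int.ofStr? — its getD 0 is unreachable under Pre_ga (A raises there).
def gaL (res : List Char) : List Char → List String
  | [] => [String.ofList res]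
  | c :: rest =>
    let final1 := gaL (res ++ [c]) rest
    let res' :=
      if res = [] then res ++ ['1']
      else
        let ch := res.getLastD '0'
        if (65 ≤ ch.toNat ∧ ch.toNat ≤ 90) ∨ (97 ≤ ch.toNat ∧ ch.toNat ≤ 122) then
          res ++ ['1']
        else
          res.dropLast ++ (PySem.Int.toStr (((PySem.Int.ofStr? (String.ofList [ch])).getD 0) + 1)).toList
    let final2 := gaL res' rest
    final1 ++ final2

def ga (res : String) (s : String) : List String := gaL res.toList s.toList

-- ===== PORT B =====
-- literal port of Source B: succ gives the two children of a partial result, the fold expands one level per character.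
def gaSucc (cur : List Char) (c : Char) : List (List Char) :=
  let keep := cur ++ [c]
  let abbr :=
    if cur = [] then ['1']
    else
      let last := cur.getLastD '0'
      if (65 ≤ last.toNat ∧ last.toNat ≤ 90) ∨ (97 ≤ last.toNat ∧ last.toNat ≤ 122) then
        cur ++ ['1']
      else
        cur.dropLast ++ (PySem.Int.toStr (((PySem.Int.ofStr? (String.ofList [last])).getD 0) + 1)).toList
  [keep, abbr]

def ga_alt (res : String) (s : String) : List String :=
  (s.toList.foldl (fun level c => level.flatMap (fun cur => gaSucc cur c)) [res.toList]).map String.ofList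

-- ===== PRECONDITION & SPEC =====
-- Pre_ga excludes exactly the inputs on which A raises ValueError: int(ch) is applied to a
-- non-digit whenever the abbreviate branch fires with the running string ending in a character
-- that is neither an ASCII letter nor a digit — i.e. res nonempty ending in such a character
-- (with s nonempty), or such a character anywhere in s except its last position.
def pvAlnum (c : Char) : Bool :=
  (65 ≤ c.toNat && c.toNat ≤ 90) || (97 ≤ c.toNat && c.toNat ≤ 122) || (48 ≤ c.toNat && c.toNat ≤ 57)

def Pre_ga (res : String) (s : String) : Prop :=
  s.toList = [] ∨
    ((res.toList = [] ∨ pvAlnum (res.toList.getLastD '0') = true) ∧ s.toList.dropLast.all pvAlnum = true)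
instance (res : String) (s : String) : Decidable (Pre_ga res s) := by unfold Pre_ga; infer_instance

def pvWitness_ga : String × String := ("ab", "cd")

def Spec_ga (res : String) (s : String) (out : List String) : Prop := out = ga_alt res s
instance (res : String) (s : String) (out : List String) : Decidable (Spec_ga res s out) := by unfold Spec_ga; infer_instance

-- ===== CLAIM (what is proved, stated in full; the proofs are below) =====
def Claim_equal_ga : Prop := ∀ (res : String) (s : String), Dom_ga res s → Pre_ga res s → Spec_ga res s (ga res s)

-- ===== LEMMAS AND PROOFS =====
def pvStep (level : List (List Char)) (c : Char) : List (List Char) :=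
  level.flatMap (fun cur => gaSucc cur c)

theorem pvFoldl_append (s : List Char) (l1 l2 : List (List Char)) :
    s.foldl pvStep (l1 ++ l2) = s.foldl pvStep l1 ++ s.foldl pvStep l2 := by
  induction s generalizing l1 l2 with
  | nil => rfl
  | cons c rest ih =>
    simp only [List.foldl_cons]
    rw [show pvStep (l1 ++ l2) c = pvStep l1 c ++ pvStep l2 c from List.flatMap_append .., ih]

theorem pvMain (s res : List Char) :
    gaL res s = (s.foldl pvStep [res]).map String.ofList := by
  induction s generalizing res with
  | nil => rfl
  | cons c rest ih =>
    show gaL (res ++ [c]) rest ++ gaL _ rest = _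
    rw [List.foldl_cons,
        show pvStep [res] c = [res ++ [c]] ++ [(gaSucc res c).getLastD []] from by
          simp [pvStep, gaSucc],
        pvFoldl_append, List.map_append, ← ih, ← ih]
    by_cases h : res = []
    · subst h; rfl
    · simp [gaSucc, h]

-- ===== VERDICT (by name: the statement is the Claim_ definition above) =====
theorem ga_spec : Claim_equal_ga := by
  intro res s _ _
  unfold Spec_ga ga ga_alt
  exact pvMain _ _
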